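-- pv_equiv track=rewrite | github.com/VladGud/cryptolabs-block2 | lab3/lab3.py | generate_vandermonds_matrix
-- ===== SOURCE A (Python) =====
-- def generate_vandermonds_matrix(col : int, row : int, indx_list = None):
--     field = 2 ** 8
--
--     A = list()
--     for i in range(2, row + 2):
--         a = list()
--         for j in range(0, col):
--             a.append(pow(i, j, field))
--         A.append(a)
--
--     if indx_list == None:
--         return A
-- ===== SOURCE B (Python) =====
-- def generate_vandermonds_matrix(col: int, row: int, indx_list=None):
--     # Incremental powers: each entry is the previous one multiplied by i mod 256,
--     # instead of an independent modular exponentiation per cell.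
--     if indx_list is not None:
--         return None
--     matrix = []
--     for i in range(2, row + 2):
--         powers = []
--         p = 1
--         for _ in range(col):
--             powers.append(p)
--             p = p * i % 256
--         matrix.append(powers)
--     return matrix
-- ===== Notes on version B (the rewrite author's own statement) =====
-- stated objective: faster
-- what changed: Replaces the per-cell modular exponentiation pow(i, j, 256) with an incremental running product (each entry = previous * i mod 256), and returns early in the indx_list case instead of computing the matrix and falling off the end.
import Mathlib
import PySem

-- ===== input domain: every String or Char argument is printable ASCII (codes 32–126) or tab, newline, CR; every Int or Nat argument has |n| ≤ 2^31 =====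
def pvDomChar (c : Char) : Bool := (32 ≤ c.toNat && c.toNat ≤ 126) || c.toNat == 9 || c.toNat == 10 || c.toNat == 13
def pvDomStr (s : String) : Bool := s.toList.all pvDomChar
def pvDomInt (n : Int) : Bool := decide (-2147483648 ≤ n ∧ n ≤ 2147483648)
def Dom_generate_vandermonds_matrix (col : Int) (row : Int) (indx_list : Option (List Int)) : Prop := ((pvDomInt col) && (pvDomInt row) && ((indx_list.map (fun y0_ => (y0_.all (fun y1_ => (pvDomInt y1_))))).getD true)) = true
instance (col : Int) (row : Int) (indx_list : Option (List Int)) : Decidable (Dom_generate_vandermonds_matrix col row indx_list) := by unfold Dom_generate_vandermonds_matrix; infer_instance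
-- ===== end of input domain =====

-- B replaces the per-cell modular exponentiation pow(i, j, 256) with an incremental
-- running product (each entry = previous * i mod 256); objective: faster.


-- ===== PORT A =====
-- Python A: for i in range(2, row+2): row of pow(i, j, 256) for j in range(0, col);
-- returns the matrix when indx_list == None, otherwise falls off the end (None).
def generate_vandermonds_matrix (col : Int) (row : Int) (indx_list : Option (List Int)) : Option (List (List Int)) :=
  let A := (PySem.List.pyRange 2 (row + 2) 1).map
    (fun i => (PySem.List.pyRange 0 col 1).map (fun j => PySem.Int.powMod i j.toNat 256))
  match indx_list with
  | none => some A
  | some _ => none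

-- ===== PORT B =====
-- one row of incremental powers: p, p*i%256, …  (col.toNat entries)
def pvAltRow (i : Int) : Nat → Int → List Int
  | 0, _ => []
  | n + 1, p => p :: pvAltRow i n (PySem.Int.mod (p * i) 256)

def generate_vandermonds_matrix_alt (col : Int) (row : Int) (indx_list : Option (List Int)) : Option (List (List Int)) :=
  match indx_list with
  | some _ => none
  | none => some ((PySem.List.pyRange 2 (row + 2) 1).map (fun i => pvAltRow i col.toNat 1))

-- ===== PRECONDITION & SPEC =====
def Spec_generate_vandermonds_matrix (col : Int) (row : Int) (indx_list : Option (List Int)) (out : Option (List (List Int))) : Prop := out = generate_vandermonds_matrix_alt col row indx_list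
instance (col : Int) (row : Int) (indx_list : Option (List Int)) (out : Option (List (List Int))) : Decidable (Spec_generate_vandermonds_matrix col row indx_list out) := by unfold Spec_generate_vandermonds_matrix; infer_instance

-- ===== CLAIM (what is proved, stated in full; the proofs are below) =====
def Claim_equal_generate_vandermonds_matrix : Prop := ∀ (col : Int) (row : Int) (indx_list : Option (List Int)), Dom_generate_vandermonds_matrix col row indx_list → Spec_generate_vandermonds_matrix col row indx_list (generate_vandermonds_matrix col row indx_list)

-- ===== LEMMAS AND PROOFS =====

-- the incremental row computes the same powers as the per-cell exponentiation
theorem pvAltRow_eq (i : Int) (n k : Nat) :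
    (List.range n).map (fun j => PySem.Int.mod (i ^ (k + j)) 256) =
      pvAltRow i n (PySem.Int.mod (i ^ k) 256) := by
  induction n generalizing k with
  | zero => simp [pvAltRow]
  | succ n ih =>
    rw [List.range_succ_eq_map]
    simp only [List.map_cons, List.map_map, pvAltRow, Nat.add_zero]
    congr 1
    have h : PySem.Int.mod (PySem.Int.mod (i ^ k) 256 * i) 256 =
        PySem.Int.mod (i ^ (k + 1)) 256 := by
      rw [PySem.Int.mod_eq_emod_of_pos (by norm_num),
          PySem.Int.mod_eq_emod_of_pos (by norm_num),
          PySem.Int.mod_eq_emod_of_pos (by norm_num), pow_succ]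
      conv_rhs => rw [Int.mul_emod]
      rw [Int.mul_emod (i ^ k % 256) i, Int.emod_emod_of_dvd _ (by norm_num : (256:Int) ∣ 256)]
    rw [h, ← ih (k + 1)]
    apply List.map_congr_left
    intro j hj
    simp only [Function.comp_apply]
    congr 2
    omega

theorem pvRow_eq (i : Int) (col : Int) :
    (PySem.List.pyRange 0 col 1).map (fun j => PySem.Int.powMod i j.toNat 256) =
      pvAltRow i col.toNat 1 := by
  rw [PySem.List.pyRange_one]
  have h1 : PySem.Int.mod (i ^ 0) 256 = 1 := by
    rw [PySem.Int.mod_eq_emod_of_pos (by norm_num)]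
    norm_num
  rw [← h1, ← pvAltRow_eq i col.toNat 0, List.map_map]
  have h2 : (col - 0).toNat = col.toNat := by omega
  rw [h2]
  apply List.map_congr_left
  intro k hk
  simp only [Function.comp_apply, PySem.Int.powMod, zero_add, Int.toNat_natCast]

-- ===== VERDICT (by name: the statement is the Claim_ definition above) =====
theorem generate_vandermonds_matrix_spec : Claim_equal_generate_vandermonds_matrix := by
  intro col row indx_list _
  unfold Spec_generate_vandermonds_matrix generate_vandermonds_matrix generate_vandermonds_matrix_alt
  cases indx_list with
  | some l => rfl
  | none =>
    simp only
    congr 1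
    apply List.map_congr_left
    intro i _
    exact pvRow_eq i col
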